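-- pv_equiv track=rewrite | github.com/Exigent07/sha3-py | src/sha3/keccak.py | __RC_LFSR
-- ===== SOURCE A (Python) =====
-- def __RC_LFSR(steps: int) -> int:
--     result = 0x0000000000000001
--     for _ in range(steps):
--         msb = result >> 7
--         result = (result << 1) & 0xFF
--         if msb:
--             result ^= 0x71
--     return result & 0x1
-- ===== SOURCE B (Python) =====
-- def _build_table():
--     table = []
--     state = 0x01
--     for _ in range(255):
--         table.append(state & 0x1)
--         msb = state >> 7
--         state = (state << 1) & 0xFF
--         if msb:
--             state ^= 0x71
--     return table
--
-- _TABLE = _build_table()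
--
-- def __RC_LFSR(steps: int) -> int:
--     return _TABLE[max(steps, 0) % 255]
-- ===== Notes on version B (the rewrite author's own statement) =====
-- stated objective: faster
-- what changed: B replaces the O(steps) LFSR simulation by a once-computed period-255 table of output bits indexed by max(steps,0) % 255.
import Mathlib
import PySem

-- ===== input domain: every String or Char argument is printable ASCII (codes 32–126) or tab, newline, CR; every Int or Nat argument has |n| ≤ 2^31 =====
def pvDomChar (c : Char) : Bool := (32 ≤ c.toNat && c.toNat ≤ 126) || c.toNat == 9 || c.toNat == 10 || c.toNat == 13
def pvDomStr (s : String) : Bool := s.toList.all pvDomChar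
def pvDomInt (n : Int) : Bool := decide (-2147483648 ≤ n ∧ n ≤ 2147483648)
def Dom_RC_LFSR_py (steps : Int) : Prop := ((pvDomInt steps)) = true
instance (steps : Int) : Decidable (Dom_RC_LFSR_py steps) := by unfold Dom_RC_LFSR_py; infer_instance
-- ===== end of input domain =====

-- B replaces the O(steps) loop by an O(1) lookup into a precomputed period-255 bit table ('faster' in a timing run).

-- ===== PORT A =====
-- one iteration of A's loop body
def lfsrStepA (result : Int) : Int :=
  let msb := result >>> 7
  let result := PySem.Int.band (result <<< 1) 0xFF
  if msb ≠ 0 then PySem.Int.bxor result 0x71 else result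

def RC_LFSR_py (steps : Int) : Int :=
  let result := (List.range steps.toNat).foldl (fun result _ => lfsrStepA result) 0x0000000000000001
  PySem.Int.band result 0x1

-- ===== PORT B =====
-- Source B's _build_table loop: accumulator is (table, state)
def lfsrTable : List Int :=
  ((List.range 255).foldl (fun (acc : List Int × Int) _ =>
      let table := acc.1
      let state := acc.2
      let table := table ++ [PySem.Int.band state 0x1]
      let msb := state >>> 7
      let state := PySem.Int.band (state <<< 1) 0xFF
      let state := if msb ≠ 0 then PySem.Int.bxor state 0x71 else state
      (table, state)) ([], 0x01)).1

def RC_LFSR_py_alt (steps : Int) : Int :=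
  PySem.List.pyGetD lfsrTable (PySem.Int.mod (max steps 0) 255) 0

-- ===== PRECONDITION & SPEC =====
def Spec_RC_LFSR_py (steps : Int) (out : Int) : Prop := out = RC_LFSR_py_alt steps
instance (steps : Int) (out : Int) : Decidable (Spec_RC_LFSR_py steps out) := by unfold Spec_RC_LFSR_py; infer_instance

-- ===== CLAIM (what is proved, stated in full; the proofs are below) =====
def Claim_equal_RC_LFSR_py : Prop := ∀ (steps : Int), Dom_RC_LFSR_py steps → Spec_RC_LFSR_py steps (RC_LFSR_py steps)

-- ===== LEMMAS AND PROOFS =====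

-- folding the loop body over range n is iteration
theorem foldl_range_iterate (f : Int → Int) (x : Int) (n : Nat) :
    (List.range n).foldl (fun r _ => f r) x = f^[n] x := by
  induction n with
  | zero => simp
  | succ n ih => simp [List.range_succ, ih, Function.iterate_succ_apply']

set_option maxRecDepth 40000 in
theorem lfsrStepA_period : lfsrStepA^[255] 1 = 1 := by decide

theorem iterate_mul_period (q : Nat) : lfsrStepA^[q * 255] 1 = 1 := by
  induction q with
  | zero => simp
  | succ q ih =>
    have : (q + 1) * 255 = q * 255 + 255 := by ring
    rw [this, Function.iterate_add_apply, lfsrStepA_period, ih]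

theorem iterate_mod (n : Nat) : lfsrStepA^[n] 1 = lfsrStepA^[n % 255] 1 := by
  conv_lhs => rw [← Nat.mod_add_div n 255]
  rw [Function.iterate_add_apply, Nat.mul_comm, iterate_mul_period]

-- the table builder's accumulator after n rounds
theorem table_aux (n : Nat) :
    (List.range n).foldl (fun (acc : List Int × Int) _ =>
      let table := acc.1
      let state := acc.2
      let table := table ++ [PySem.Int.band state 0x1]
      let msb := state >>> 7
      let state := PySem.Int.band (state <<< 1) 0xFF
      let state := if msb ≠ 0 then PySem.Int.bxor state 0x71 else state
      (table, state)) ([], 0x01)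
    = ((List.range n).map (fun k => PySem.Int.band (lfsrStepA^[k] 1) 1), lfsrStepA^[n] 1) := by
  induction n with
  | zero => simp
  | succ n ih =>
    rw [List.range_succ, List.foldl_append, ih, List.map_append]
    simp [Function.iterate_succ_apply', lfsrStepA]

theorem lfsrTable_eq : lfsrTable = (List.range 255).map (fun k => PySem.Int.band (lfsrStepA^[k] 1) 1) := by
  unfold lfsrTable
  rw [table_aux]

-- ===== VERDICT (by name: the statement is the Claim_ definition above) =====
theorem RC_LFSR_py_spec : Claim_equal_RC_LFSR_py := by
  intro steps _
  unfold Spec_RC_LFSR_py RC_LFSR_py RC_LFSR_py_alt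
  rw [foldl_range_iterate, lfsrTable_eq]
  have hmax : max steps 0 = ((steps.toNat : Nat) : Int) := by omega
  have h255 : (255 : Int) = ((255 : Nat) : Int) := rfl
  rw [hmax, h255, PySem.Int.mod_natCast, PySem.List.pyGetD_natCast]
  rw [List.getD_eq_getElem?_getD, List.getElem?_map]
  have hlt : steps.toNat % 255 < 255 := Nat.mod_lt _ (by norm_num)
  rw [List.getElem?_range hlt]
  simp [iterate_mod steps.toNat]
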